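-- pv_equiv track=rewrite | github.com/andlit0vv/smart-spell | backend/reading.py | _fallback_text
-- ===== SOURCE A (Python) =====
-- def _fallback_text(target_words: list[str], words_per_term: int) -> str:
--     target_count = max(len(target_words) * words_per_term, len(target_words))
--     seed = " ".join(target_words)
--     text = (
--         f"In today\'s lesson, we practice {seed} in a short story. "
--         "A student reads, repeats each term, and writes simple examples to remember them."
--     )
--     words = text.split()
--     if len(words) >= target_count:
--         return " ".join(words[:target_count])
--
--     fill = "The learner stays focused and reviews the text again with confidence."
--     while len(words) < target_count:
--         words.extend(fill.split())
--     return " ".join(words[:target_count])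
-- ===== SOURCE B (Python) =====
-- def _fallback_text(target_words: list[str], words_per_term: int) -> str:
--     target_count = max(len(target_words) * words_per_term, len(target_words))
--     seed = " ".join(target_words)
--     text = (
--         f"In today's lesson, we practice {seed} in a short story. "
--         "A student reads, repeats each term, and writes simple examples to remember them."
--     )
--     words = text.split()
--     if len(words) >= target_count:
--         return " ".join(words[:target_count])
--
--     fill_words = "The learner stays focused and reviews the text again with confidence.".split()
--     needed = target_count - len(words)
--     repeats = -(-needed // len(fill_words))
--     return " ".join((words + fill_words * repeats)[:target_count])
-- ===== Notes on version B (the rewrite author's own statement) =====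
-- stated objective: alternative
-- what changed: Replaces the while loop that repeatedly extends the word list (re-splitting the fill sentence each iteration) with a closed-form ceiling-division computing the number of repetitions and a single list multiplication.
import Mathlib
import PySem

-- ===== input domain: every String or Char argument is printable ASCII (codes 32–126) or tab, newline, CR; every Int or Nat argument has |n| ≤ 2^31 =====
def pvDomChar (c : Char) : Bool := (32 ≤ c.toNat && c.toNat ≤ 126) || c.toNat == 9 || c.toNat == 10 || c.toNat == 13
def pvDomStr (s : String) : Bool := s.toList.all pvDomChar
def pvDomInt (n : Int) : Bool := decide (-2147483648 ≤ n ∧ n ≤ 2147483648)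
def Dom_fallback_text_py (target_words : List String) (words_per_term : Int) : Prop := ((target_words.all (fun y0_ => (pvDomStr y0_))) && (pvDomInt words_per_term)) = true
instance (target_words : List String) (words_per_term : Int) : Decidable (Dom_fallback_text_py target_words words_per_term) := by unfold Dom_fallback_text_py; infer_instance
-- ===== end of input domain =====

-- B replaces A's extend-until-long-enough while loop by a closed-form ceiling division and one list multiplication; same return value, no speed claim.

-- ===== PORT A =====
def pvFill : String := "The learner stays focused and reviews the text again with confidence."

-- the fill sentence splits into 11 words; used for termination of the while loop
theorem pvFill_split_len : (PySem.Str.split₀ pvFill).length = 11 := by decide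

-- 'while len(words) < target_count: words.extend(fill.split())'
def pvPadLoop (tc : Int) (words : List String) : List String :=
  if (words.length : Int) < tc then pvPadLoop tc (words ++ PySem.Str.split₀ pvFill) else words
termination_by (tc - words.length).toNat
decreasing_by
  simp only [List.length_append, pvFill_split_len]
  omega

def fallback_text_py (target_words : List String) (words_per_term : Int) : String :=
  let target_count : Int := max ((target_words.length : Int) * words_per_term) (target_words.length : Int)
  let seed := PySem.Str.join " " target_words
  let text := "In today's lesson, we practice " ++ seed ++ " in a short story. A student reads, repeats each term, and writes simple examples to remember them."
  let words := PySem.Str.split₀ text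
  if (words.length : Int) ≥ target_count then
    PySem.Str.join " " (PySem.List.slice words none (some target_count))
  else
    PySem.Str.join " " (PySem.List.slice (pvPadLoop target_count words) none (some target_count))

-- ===== PORT B =====
def fallback_text_py_alt (target_words : List String) (words_per_term : Int) : String :=
  let target_count : Int := max ((target_words.length : Int) * words_per_term) (target_words.length : Int)
  let seed := PySem.Str.join " " target_words
  let text := "In today's lesson, we practice " ++ seed ++ " in a short story. A student reads, repeats each term, and writes simple examples to remember them."
  let words := PySem.Str.split₀ text
  if (words.length : Int) ≥ target_count then
    PySem.Str.join " " (PySem.List.slice words none (some target_count))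
  else
    let fill_words := PySem.Str.split₀ "The learner stays focused and reviews the text again with confidence."
    let needed := target_count - (words.length : Int)
    let repeats := -(PySem.Int.floordiv (-needed) (fill_words.length : Int))
    PySem.Str.join " " (PySem.List.slice (words ++ (List.replicate repeats.toNat fill_words).flatten) none (some target_count))

-- ===== PRECONDITION & SPEC =====
def Spec_fallback_text_py (target_words : List String) (words_per_term : Int) (out : String) : Prop := out = fallback_text_py_alt target_words words_per_term
instance (target_words : List String) (words_per_term : Int) (out : String) : Decidable (Spec_fallback_text_py target_words words_per_term out) := by unfold Spec_fallback_text_py; infer_instance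

-- ===== CLAIM (what is proved, stated in full; the proofs are below) =====
def Claim_equal_fallback_text_py : Prop := ∀ (target_words : List String) (words_per_term : Int), Dom_fallback_text_py target_words words_per_term → Spec_fallback_text_py target_words words_per_term (fallback_text_py target_words words_per_term)

-- ===== LEMMAS AND PROOFS =====

-- A's padding loop equals appending the ceiling-division number of copies of the fill words
theorem pvPadLoop_closed (tc : Int) (words : List String) :
    pvPadLoop tc words =
      words ++ (List.replicate (-(PySem.Int.floordiv ((words.length : Int) - tc) 11)).toNat
                 (PySem.Str.split₀ pvFill)).flatten := by
  induction words using pvPadLoop.induct tc with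
  | case1 words h ih =>
    rw [pvPadLoop, if_pos h, ih]
    have h1 := PySem.Int.floordiv_mul_add_mod ((words.length : Int) - tc) 11
    have h2 := PySem.Int.floordiv_mul_add_mod (((words ++ PySem.Str.split₀ pvFill).length : Int) - tc) 11
    have hm1 := PySem.Int.mod_nonneg ((words.length : Int) - tc) (b := 11) (by omega)
    have hm1' := PySem.Int.mod_lt ((words.length : Int) - tc) (b := 11) (by omega)
    have hm2 := PySem.Int.mod_nonneg (((words ++ PySem.Str.split₀ pvFill).length : Int) - tc) (b := 11) (by omega)
    have hm2' := PySem.Int.mod_lt (((words ++ PySem.Str.split₀ pvFill).length : Int) - tc) (b := 11) (by omega)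
    have hlen : ((words ++ PySem.Str.split₀ pvFill).length : Int) = (words.length : Int) + 11 := by
      simp [List.length_append, pvFill_split_len]
    rw [hlen] at h2 hm2 hm2' ⊢
    set q1 := PySem.Int.floordiv ((words.length : Int) - tc) 11 with hq1
    set q2 := PySem.Int.floordiv ((words.length : Int) + 11 - tc) 11 with hq2
    have hk : (-q1).toNat = (-q2).toNat + 1 := by omega
    rw [hk, List.replicate_succ, List.flatten_cons, ← List.append_assoc]
  | case2 words h =>
    rw [pvPadLoop, if_neg h]
    have h1 := PySem.Int.floordiv_mul_add_mod ((words.length : Int) - tc) 11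
    have hm1 := PySem.Int.mod_nonneg ((words.length : Int) - tc) (b := 11) (by omega)
    have hm1' := PySem.Int.mod_lt ((words.length : Int) - tc) (b := 11) (by omega)
    have : (-(PySem.Int.floordiv ((words.length : Int) - tc) 11)).toNat = 0 := by omega
    rw [this, List.replicate_zero, List.flatten_nil, List.append_nil]

-- ===== VERDICT (by name: the statement is the Claim_ definition above) =====
theorem fallback_text_py_spec : Claim_equal_fallback_text_py := by
  intro target_words words_per_term _
  unfold Spec_fallback_text_py fallback_text_py fallback_text_py_alt
  simp only []
  split_ifs with h
  · rfl
  · rw [pvPadLoop_closed]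
    have hf : (PySem.Str.split₀ "The learner stays focused and reviews the text again with confidence.") = PySem.Str.split₀ pvFill := rfl
    rw [hf, pvFill_split_len]
    have : -(max ((target_words.length : Int) * words_per_term) (target_words.length : Int)
              - ((PySem.Str.split₀ ("In today's lesson, we practice " ++ PySem.Str.join " " target_words ++ " in a short story. A student reads, repeats each term, and writes simple examples to remember them.")).length : Int))
           = ((PySem.Str.split₀ ("In today's lesson, we practice " ++ PySem.Str.join " " target_words ++ " in a short story. A student reads, repeats each term, and writes simple examples to remember them.")).length : Int)
             - max ((target_words.length : Int) * words_per_term) (target_words.length : Int) := by ring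
    rw [this]; norm_cast
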